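-- pv_equiv track=rewrite | github.com/iamacewhite/COMSW3101 | hw4.py | pickitems
-- ===== SOURCE A (Python) =====
-- import itertools
--
-- def pickitems(price, cash):
--     for n in range(len(price)):
--         temp = itertools.permutations(price, n+1)
--         for item in temp:
--             cal = 0
--             for i in range(len(item)):
--                 cal += item[i]
--                 if cal == cash:
--                     return item[:i+1]
-- ===== SOURCE B (Python) =====
-- import itertools
--
-- def pickitems(price, cash):
--     for n in range(len(price)):
--         for combo in itertools.combinations(price, n + 1):
--             if sum(combo) == cash:
--                 return combo
-- ===== Notes on version B (the rewrite author's own statement) =====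
-- stated objective: faster
-- what changed: B enumerates combinations by increasing size and tests each selection's total sum, instead of A's scan of all permutations with running prefix sums; since order does not affect a sum, the first matching combination equals the prefix A returns. Intended as faster: in a timing run A timed out at n=16 where B returned, but no ratio could be measured.
import Mathlib
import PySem

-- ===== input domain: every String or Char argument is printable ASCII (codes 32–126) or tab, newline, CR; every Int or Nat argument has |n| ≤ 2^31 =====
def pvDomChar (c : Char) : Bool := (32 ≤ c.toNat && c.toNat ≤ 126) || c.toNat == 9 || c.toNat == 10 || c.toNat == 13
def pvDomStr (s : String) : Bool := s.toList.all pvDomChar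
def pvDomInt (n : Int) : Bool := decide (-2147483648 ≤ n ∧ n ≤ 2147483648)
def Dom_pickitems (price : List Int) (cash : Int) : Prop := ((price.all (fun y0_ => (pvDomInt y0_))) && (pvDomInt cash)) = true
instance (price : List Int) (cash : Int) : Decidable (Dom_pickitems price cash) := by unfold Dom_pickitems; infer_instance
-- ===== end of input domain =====

-- B replaces A's scan of all permutations (with running prefix sums) by a scan of
-- combinations by increasing size, testing each selection's total sum; intended as faster
-- (in a timing run A timed out at n=16 where B returned; no ratio could be measured).

-- ===== PORT A =====
-- inner loop: cal = 0; for i in range(len(item)): cal += item[i]; if cal == cash: return item[:i+1]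
def innerA (cash : Int) : List Int → Int → List Int → Option (List Int)
  | [], _, _ => none
  | x :: rest, cal, taken =>
    let cal2 := cal + x
    if cal2 = cash then some (taken ++ [x]) else innerA cash rest cal2 (taken ++ [x])

-- middle loop: for item in itertools.permutations(price, n+1): … (early return)
def scanPermsA (cash : Int) : List (List Int) → Option (List Int)
  | [] => none
  | p :: ps =>
    match innerA cash p 0 [] with
    | some r => some r
    | none => scanPermsA cash ps

-- outer loop: for n in range(len(price)): … (early return; falls off the end → None)
def loopA (price : List Int) (cash : Int) : List Nat → Option (List Int)
  | [] => none
  | n :: ns =>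
    match scanPermsA cash (PySem.List.permutations price (n + 1)) with
    | some r => some r
    | none => loopA price cash ns

def pickitems (price : List Int) (cash : Int) : Option (List Int) :=
  loopA price cash (List.range price.length)

-- ===== PORT B =====
-- for combo in itertools.combinations(price, n+1): if sum(combo) == cash: return combo
def scanCombsB (cash : Int) : List (List Int) → Option (List Int)
  | [] => none
  | c :: cs => if c.sum = cash then some c else scanCombsB cash cs

def loopB (price : List Int) (cash : Int) : List Nat → Option (List Int)
  | [] => none
  | n :: ns =>
    match scanCombsB cash (PySem.List.combinations price (n + 1)) with
    | some r => some r
    | none => loopB price cash ns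

def pickitems_alt (price : List Int) (cash : Int) : Option (List Int) :=
  loopB price cash (List.range price.length)

-- ===== PRECONDITION & SPEC =====
def Spec_pickitems (price : List Int) (cash : Int) (out : Option (List Int)) : Prop := out = pickitems_alt price cash
instance (price : List Int) (cash : Int) (out : Option (List Int)) : Decidable (Spec_pickitems price cash out) := by unfold Spec_pickitems; infer_instance

-- ===== CLAIM (what is proved, stated in full; the proofs are below) =====
def Claim_equal_pickitems : Prop := ∀ (price : List Int) (cash : Int), Dom_pickitems price cash → Spec_pickitems price cash (pickitems price cash)

-- ===== LEMMAS AND PROOFS =====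

-- "no selection of r distinct items of t sums to c"
def NoSub (t : List Int) (r : Nat) (c : Int) : Prop :=
  ∀ p : List Int, p.Subperm t → p.length = r → p.sum ≠ c

theorem scanCombsB_eq_find? (cash : Int) (l : List (List Int)) :
    scanCombsB cash l = l.find? (fun c => decide (c.sum = cash)) := by
  induction l with
  | nil => rfl
  | cons c cs ih =>
    by_cases h : c.sum = cash <;> simp [scanCombsB, List.find?, h, ih]

theorem find?_flatMap_congr {α β : Type} (P : β → Bool) (l : List α) (f g : α → List β)
    (h : ∀ a ∈ l, (f a).find? P = (g a).find? P) :
    (l.flatMap f).find? P = (l.flatMap g).find? P := by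
  induction l with
  | nil => rfl
  | cons a t ih =>
    simp only [List.flatMap_cons, List.find?_append]
    rw [h a (by simp), ih (fun b hb => h b (by simp [hb]))]

theorem perm_eraseIdx (t : List Int) (j : Nat) (hj : j < t.length) :
    t.Perm (t[j] :: t.eraseIdx j) := by
  conv_lhs => rw [← List.take_append_drop j t]
  rw [List.eraseIdx_eq_take_drop_succ]
  rw [← List.getElem_cons_drop hj]
  exact List.perm_middle

theorem mem_perms_cons (x : Int) : ∀ (r : Nat) (xs p : List Int),
    p ∈ PySem.List.permutations xs r → p ∈ PySem.List.permutations (x :: xs) r := by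
  intro r
  induction r with
  | zero => intro xs p h; simpa [PySem.List.permutations_zero] using h
  | succ r ih =>
    intro xs p h
    rw [PySem.List.permutations_succ] at h ⊢
    obtain ⟨i, hi, hp⟩ := List.mem_flatMap.mp h
    rw [List.mem_range] at hi
    rw [List.getElem?_eq_getElem hi] at hp
    obtain ⟨q, hq, rfl⟩ := List.mem_map.mp hp
    refine List.mem_flatMap.mpr ⟨i + 1, List.mem_range.mpr (by simpa using Nat.succ_lt_succ hi), ?_⟩
    have h1 : (x :: xs)[i+1]? = some xs[i] := by
      simp [List.getElem?_cons_succ, List.getElem?_eq_getElem hi]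
    rw [h1, List.eraseIdx_cons_succ]
    exact List.mem_map.mpr ⟨q, ih _ _ hq, rfl⟩

theorem mem_perms_idx {xs : List Int} {i r : Nat} {q : List Int} (hi : i < xs.length)
    (hq : q ∈ PySem.List.permutations (xs.eraseIdx i) r) :
    xs[i] :: q ∈ PySem.List.permutations xs (r + 1) := by
  rw [PySem.List.permutations_succ]
  refine List.mem_flatMap.mpr ⟨i, List.mem_range.mpr hi, ?_⟩
  rw [List.getElem?_eq_getElem hi]
  exact List.mem_map.mpr ⟨q, hq, rfl⟩

theorem mem_perms_of_sublist {s xs : List Int} (h : s.Sublist xs) :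
    s ∈ PySem.List.permutations xs s.length := by
  induction h with
  | slnil => simp [PySem.List.permutations_zero]
  | cons a h ih => exact mem_perms_cons a _ _ _ ih
  | @cons₂ l₁ l₂ a h ih =>
    have h0 : (0 : Nat) < (a :: l₂).length := by simp
    have := mem_perms_idx (q := l₁) (r := l₁.length) h0 (by simpa using ih)
    simpa using this

theorem subperm_of_mem_perms : ∀ (r : Nat) (xs p : List Int),
    p ∈ PySem.List.permutations xs r → p.Subperm xs := by
  intro r
  induction r with
  | zero =>
    intro xs p h
    simp [PySem.List.permutations_zero] at h
    subst h; exact List.nil_subperm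
  | succ r ih =>
    intro xs p h
    rw [PySem.List.permutations_succ] at h
    obtain ⟨i, hi, hp⟩ := List.mem_flatMap.mp h
    rw [List.mem_range] at hi
    rw [List.getElem?_eq_getElem hi] at hp
    obtain ⟨q, hq, rfl⟩ := List.mem_map.mp hp
    have h1 : (xs[i] :: q).Subperm (xs[i] :: xs.eraseIdx i) :=
      (List.subperm_cons _).mpr (ih _ _ hq)
    exact h1.trans (perm_eraseIdx xs i hi).symm.subperm

theorem noSub_of_find?_none {t : List Int} {r : Nat} {c : Int}
    (h : (PySem.List.permutations t r).find? (fun p => decide (p.sum = c)) = none) :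
    NoSub t r c := by
  intro p hsp hlen hsum
  obtain ⟨l, hperm, hsub⟩ := hsp
  have hl : l ∈ PySem.List.permutations t r := by
    have := mem_perms_of_sublist hsub
    rwa [hperm.length_eq, hlen] at this
  have := List.find?_eq_none.mp h l hl
  simp only [decide_eq_true_eq] at this
  exact this (by rw [hperm.sum_eq, hsum])

-- the first x-containing-free match is the same with or without x in the pool,
-- provided the predicate fails on every x-containing candidate
theorem find?_perms_drop_head (x : Int) : ∀ (r : Nat) (u : List Int) (P : List Int → Bool),
    (∀ p ∈ PySem.List.permutations (x :: u) r, x ∈ p → P p = false) →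
    (∀ p ∈ PySem.List.permutations u r, x ∈ p → P p = false) →
    (PySem.List.permutations (x :: u) r).find? P = (PySem.List.permutations u r).find? P := by
  intro r
  induction r with
  | zero => intro u P _ _; simp [PySem.List.permutations_zero]
  | succ r ih =>
    intro u P H1 H2
    rw [PySem.List.permutations_succ, PySem.List.permutations_succ]
    have hlen : (x :: u).length = u.length + 1 := by simp
    rw [hlen, List.range_succ_eq_map, List.flatMap_cons, List.find?_append]
    simp only [List.getElem?_cons_zero, List.eraseIdx_cons_zero]
    have hchunk0 : ((PySem.List.permutations u r).map (fun p => x :: p)).find? P = none := by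
      refine List.find?_eq_none.mpr ?_
      intro y hy
      obtain ⟨q, hq, rfl⟩ := List.mem_map.mp hy
      have hmem : x :: q ∈ PySem.List.permutations (x :: u) (r + 1) :=
        mem_perms_idx (xs := x :: u) (i := 0) (by simp) (by simpa using hq)
      simp [H1 _ hmem (by simp)]
    rw [hchunk0, Option.none_or, List.flatMap_map]
    refine find?_flatMap_congr P (List.range u.length) _ _ ?_
    intro j hj
    rw [List.mem_range] at hj
    simp only [List.getElem?_cons_succ, List.eraseIdx_cons_succ,
      List.getElem?_eq_getElem hj]
    rw [List.find?_map, List.find?_map]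
    have := ih (u.eraseIdx j) (fun p => P (u[j] :: p))
      (fun p hp hx => H1 _ (mem_perms_idx (xs := x :: u) (i := j + 1)
          (by simpa using Nat.succ_lt_succ hj)
          (by simpa [List.eraseIdx_cons_succ] using hp))
        (List.mem_cons_of_mem _ hx))
      (fun p hp hx => H2 _ (mem_perms_idx hj hp) (List.mem_cons_of_mem _ hx))
    exact congrArg (Option.map (fun p => u[j] :: p)) this

theorem sum_ne_of_noSub {t p : List Int} {x c : Int} {j r : Nat} (hj : j < t.length)
    (NS : NoSub t r (c - x)) (hpe : (p.erase x).Subperm (t.eraseIdx j)) (hx : x ∈ p)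
    (hlen : p.length = r) : (t[j] :: p).sum ≠ c := by
  have hq : (t[j] :: p.erase x).Subperm t :=
    ((List.subperm_cons _).mpr hpe).trans (perm_eraseIdx t j hj).symm.subperm
  have hr1 : 1 ≤ r := by
    have := List.length_pos_of_mem hx; omega
  have hql : (t[j] :: p.erase x).length = r := by
    simp [List.length_erase_of_mem hx, hlen]; omega
  have hqs := NS _ hq hql
  have hps : p.sum = x + (p.erase x).sum := (List.perm_cons_erase hx).sum_eq
  simp only [List.sum_cons] at hqs ⊢
  omega

theorem find?_perms_eq_find?_combs : ∀ (xs : List Int) (r : Nat) (c : Int),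
    (PySem.List.permutations xs r).find? (fun p => decide (p.sum = c))
      = (PySem.List.combinations xs r).find? (fun p => decide (p.sum = c)) := by
  intro xs
  induction xs with
  | nil =>
    intro r c
    cases r with
    | zero => rfl
    | succ r => simp [PySem.List.permutations_succ, PySem.List.combinations_nil_succ]
  | cons x t ih =>
    intro r c
    cases r with
    | zero => rfl
    | succ r =>
      rw [PySem.List.permutations_succ, PySem.List.combinations_cons_succ, List.find?_append]
      have hlen : (x :: t).length = t.length + 1 := by simp
      rw [hlen, List.range_succ_eq_map, List.flatMap_cons, List.find?_append]
      have hpred : (fun p => decide (p.sum = c)) ∘ (fun p => x :: p)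
          = (fun p : List Int => decide (p.sum = (c - x))) := by
        funext p
        simp only [Function.comp_apply, List.sum_cons]
        exact decide_eq_decide.mpr (by omega)
      simp only [List.getElem?_cons_zero, List.eraseIdx_cons_zero]
      have hchunk0 : ((PySem.List.permutations t r).map (fun p => x :: p)).find? (fun p => decide (p.sum = c))
          = Option.map (fun p => x :: p) ((PySem.List.permutations t r).find? (fun p => decide (p.sum = (c - x)))) := by
        rw [List.find?_map, hpred]
      have hcomb0 : ((PySem.List.combinations t r).map (x :: ·)).find? (fun p => decide (p.sum = c))
          = Option.map (x :: ·) ((PySem.List.combinations t r).find? (fun p => decide (p.sum = (c - x)))) := by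
        rw [List.find?_map, hpred]
      rw [hchunk0, hcomb0, ih r (c - x)]
      cases hF : (PySem.List.combinations t r).find? (fun p => decide (p.sum = (c - x))) with
      | some v => rfl
      | none =>
        simp only [Option.map_none, Option.none_or]
        have hFp : (PySem.List.permutations t r).find? (fun p => decide (p.sum = (c - x))) = none := by
          rw [ih r (c - x)]; exact hF
        have NS : NoSub t r (c - x) := noSub_of_find?_none hFp
        rw [← ih (r + 1) c, PySem.List.permutations_succ, List.flatMap_map]
        refine find?_flatMap_congr _ (List.range t.length) _ _ ?_
        intro j hj
        rw [List.mem_range] at hj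
        simp only [List.getElem?_cons_succ, List.eraseIdx_cons_succ,
          List.getElem?_eq_getElem hj]
        rw [List.find?_map, List.find?_map]
        have := find?_perms_drop_head x r (t.eraseIdx j)
          ((fun p => decide (p.sum = c)) ∘ (fun p => t[j] :: p))
          (fun p hp hx => by
            have hsp : (p.erase x).Subperm (t.eraseIdx j) := by
              have h1 : (x :: p.erase x).Subperm (x :: t.eraseIdx j) :=
                (List.perm_cons_erase hx).symm.subperm.trans (subperm_of_mem_perms _ _ _ hp)
              exact (List.subperm_cons _).mp h1
            simpa using sum_ne_of_noSub hj NS hsp hx (PySem.List.length_of_mem_permutations hp))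
          (fun p hp hx => by
            have hsp : (p.erase x).Subperm (t.eraseIdx j) :=
              List.erase_sublist.subperm.trans (subperm_of_mem_perms _ _ _ hp)
            simpa using sum_ne_of_noSub hj NS hsp hx (PySem.List.length_of_mem_permutations hp))
        rw [this]

-- inner prefix scan: when no proper non-empty prefix hits, it is the full-sum test
theorem innerA_eq : ∀ (rest taken : List Int) (cash : Int), rest ≠ [] →
    (∀ k, 1 ≤ k → k < rest.length → taken.sum + (rest.take k).sum ≠ cash) →
    innerA cash rest taken.sum taken
      = if taken.sum + rest.sum = cash then some (taken ++ rest) else none := by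
  intro rest
  induction rest with
  | nil => intro taken cash h; exact absurd rfl h
  | cons x rest' ih =>
    intro taken cash _ hpre
    show (if taken.sum + x = cash then some (taken ++ [x])
        else innerA cash rest' (taken.sum + x) (taken ++ [x]))
      = if taken.sum + (x :: rest').sum = cash then some (taken ++ x :: rest') else none
    cases rest' with
    | nil =>
      simp only [List.sum_cons, List.sum_nil, add_zero]
      split_ifs with h
      · rfl
      · rfl
    | cons y rest'' =>
      have hx : taken.sum + x ≠ cash := by
        have := hpre 1 le_rfl (by simp)
        simpa using this
      rw [if_neg hx]
      have hsum : (taken ++ [x]).sum = taken.sum + x := by simp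
      have := ih (taken ++ [x]) cash (by simp) (fun k hk1 hk2 => by
        have := hpre (k + 1) (by omega) (by simpa using Nat.succ_lt_succ hk2)
        simpa [List.sum_append, add_assoc] using this)
      rw [hsum] at this
      rw [this]
      simp [List.sum_cons, add_assoc]

theorem scanPermsA_eq_find? (cash : Int) (l : List (List Int))
    (h : ∀ p ∈ l, p ≠ [] ∧ ∀ k, 1 ≤ k → k < p.length → (p.take k).sum ≠ cash) :
    scanPermsA cash l = l.find? (fun p => decide (p.sum = cash)) := by
  induction l with
  | nil => rfl
  | cons p ps ih =>
    obtain ⟨hne, hpre⟩ := h p (by simp)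
    have h0 : innerA cash p 0 [] = if p.sum = cash then some p else none := by
      have := innerA_eq p [] cash hne (fun k hk1 hk2 => by simpa using hpre k hk1 hk2)
      simpa using this
    show (match innerA cash p 0 [] with
      | some r => some r
      | none => scanPermsA cash ps) = _
    rw [h0, ih (fun q hq => h q (by simp [hq]))]
    by_cases hs : p.sum = cash <;> simp [List.find?, hs]

theorem loops_eq (price : List Int) (cash : Int) : ∀ (d k : Nat),
    (∀ s, 1 ≤ s → s ≤ k → NoSub price s cash) →
    loopA price cash (List.range' k d) = loopB price cash (List.range' k d) := by
  intro d
  induction d with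
  | zero => intro k _; rfl
  | succ d ih =>
    intro k hInv
    rw [List.range'_succ]
    have hstage : scanPermsA cash (PySem.List.permutations price (k + 1))
        = (PySem.List.combinations price (k + 1)).find? (fun p => decide (p.sum = cash)) := by
      rw [scanPermsA_eq_find? cash _ ?hp, find?_perms_eq_find?_combs]
      case hp =>
        intro p hp
        have hlen : p.length = k + 1 := PySem.List.length_of_mem_permutations hp
        refine ⟨by intro h; rw [h] at hlen; simp at hlen, ?_⟩
        intro m hm1 hm2
        have hsub : (p.take m).Subperm price :=
          ((List.take_sublist m p).subperm).trans (subperm_of_mem_perms _ _ _ hp)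
        have hlm : (p.take m).length = m := by
          rw [List.length_take]; omega
        exact hInv m hm1 (by omega) _ hsub hlm
    show (match scanPermsA cash (PySem.List.permutations price (k + 1)) with
        | some r => some r | none => loopA price cash (List.range' (k+1) d))
      = (match scanCombsB cash (PySem.List.combinations price (k + 1)) with
        | some r => some r | none => loopB price cash (List.range' (k+1) d))
    rw [hstage, scanCombsB_eq_find?]
    cases hF : (PySem.List.combinations price (k + 1)).find? (fun p => decide (p.sum = cash)) with
    | some v => rfl
    | none =>
      have NS : NoSub price (k + 1) cash := by
        refine noSub_of_find?_none ?_
        rw [find?_perms_eq_find?_combs]; exact hF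
      exact ih (k + 1) (fun s hs1 hs2 => by
        rcases Nat.lt_or_ge s (k + 1) with h | h
        · exact hInv s hs1 (by omega)
        · have : s = k + 1 := by omega
          rw [this]; exact NS)

-- ===== VERDICT (by name: the statement is the Claim_ definition above) =====
theorem pickitems_spec : Claim_equal_pickitems := by
  intro price cash _
  show pickitems price cash = pickitems_alt price cash
  unfold pickitems pickitems_alt
  rw [List.range_eq_range']
  exact loops_eq price cash price.length 0 (fun s hs1 hs2 => by omega)
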